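-- pv_equiv track=rewrite | github.com/cutehammond772/problem-solving-archive | 백준/Gold/31716. 현대모비스 자율 주행 테스팅 1/현대모비스 자율 주행 테스팅 1.py | solve
-- ===== SOURCE A (Python) =====
-- INF = int(1e18)
--
-- def solve(N, K, track):
--   # memo[row][col][start]
--   memo = [[[INF, INF] for _ in range(N)] for _ in range(2)]
--
--   # 초기 설정
--   memo[0][0][0] = 0 if track[0][0] == '.' else INF
--   memo[1][0][1] = 0 if track[1][0] == '.' else INF
--
--   memo[0][0][1] = min(memo[0][0][1], memo[1][0][1] + 1) if track[0][0] == '.' else INF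
--   memo[1][0][0] = min(memo[1][0][0], memo[0][0][0] + 1) if track[1][0] == '.' else INF
--
--   for start in range(2):
--     for col in range(1, N):
--       # 1. 직진
--       for row in range(2):
--         if track[row][col] == '#':
--           continue
--
--         memo[row][col][start] = min(memo[row][col][start], memo[row][col - 1][start] + 1)
--
--       # 2. 차선 변경
--       for row in range(2):
--         if track[row][col] == '#':
--           continue
--
--         memo[row][col][start] = min(memo[row][col][start], memo[1 - row][col][start] + 1)
--
--   result = INF
--
--   if K == 1:
--     result = min(result, memo[0][-1][0], memo[0][-1][1], memo[1][-1][0], memo[1][-1][1])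
--     return result if result < INF else -1
--
--   if track[0][0] != '#' and track[0][-1] != '#':
--     result = min(result, min(memo[0][-1][0], memo[0][-1][1]) + (memo[0][-1][0] * (K - 2)) + min(memo[0][-1][0], memo[1][-1][0]) + (K - 1))
--
--   if track[1][0] != '#' and track[1][-1] != '#':
--     result = min(result, min(memo[1][-1][0], memo[1][-1][1]) + (memo[1][-1][1] * (K - 2)) + min(memo[0][-1][1], memo[1][-1][1]) + (K - 1))
--
--   return result if result < INF else -1
-- ===== SOURCE B (Python) =====
-- INF = int(1e18)
--
-- def solve(N, K, track):
--     # Combinatorial shortest path: every move costs 1, so the cost of reaching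
--     # column N-1 is (N-1) plus the number of lane switches, and the minimal
--     # number of switches is the number of lane changes along the sequence of
--     # *forced* lanes (columns where exactly one cell is passable).  The trip is
--     # impossible iff some column is fully blocked, two adjacent columns force
--     # different lanes, or the start/end cell is blocked.  Column 0 is passable
--     # only where the cell is '.', later columns wherever the cell is not '#',
--     # exactly as in the problem's move rules.
--     def blocked(l, c):
--         return track[l][c] != '.' if c == 0 else track[l][c] == '#'
--
--     forced = []           # (column, the single passable lane)
--     dead = False          # some column is fully blocked
--     for c in range(N):
--         t, b = blocked(0, c), blocked(1, c)
--         if t and b: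
--             dead = True
--         elif t:
--             forced.append((c, 1))
--         elif b:
--             forced.append((c, 0))
--     dead = dead or any(c2 == c1 + 1 and l1 != l2
--                        for (c1, l1), (c2, l2) in zip(forced, forced[1:]))
--     lanes = [l for _, l in forced]
--
--     def dist(s, r):
--         if dead or blocked(s, 0) or blocked(r, N - 1):
--             return INF
--         seq = [s] + lanes + [r]
--         return (N - 1) + sum(x != y for x, y in zip(seq, seq[1:]))
--
--     e00, e10 = dist(0, 0), dist(0, 1)   # start lane 0 -> end lane 0 / 1
--     e01, e11 = dist(1, 0), dist(1, 1)   # start lane 1 -> end lane 0 / 1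
--
--     if K == 1:
--         best = min(e00, e01, e10, e11)
--         return best if best < INF else -1
--
--     result = INF
--     if track[0][0] != '#' and track[0][-1] != '#':
--         result = min(result, min(e00, e01) + e00 * (K - 2) + min(e00, e10) + (K - 1))
--     if track[1][0] != '#' and track[1][-1] != '#':
--         result = min(result, min(e10, e11) + e11 * (K - 2) + min(e01, e11) + (K - 1))
--     return result if result < INF else -1
-- ===== Notes on version B (the rewrite author's own statement) =====
-- stated objective: alternative
-- what changed: A propagates per-cell costs column by column through a 2xNx2 memo table (one pass per start lane, three sub-passes per column); B never propagates costs: it scans the track once for its blocked-column structure (forced-lane columns, fully blocked columns, adjacent conflicting forced columns) and computes each of the four distances in closed form as (N-1) plus the number of lane changes along the forced-lane sequence, feeding them into the same K-aggregation formula.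
import Mathlib
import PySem

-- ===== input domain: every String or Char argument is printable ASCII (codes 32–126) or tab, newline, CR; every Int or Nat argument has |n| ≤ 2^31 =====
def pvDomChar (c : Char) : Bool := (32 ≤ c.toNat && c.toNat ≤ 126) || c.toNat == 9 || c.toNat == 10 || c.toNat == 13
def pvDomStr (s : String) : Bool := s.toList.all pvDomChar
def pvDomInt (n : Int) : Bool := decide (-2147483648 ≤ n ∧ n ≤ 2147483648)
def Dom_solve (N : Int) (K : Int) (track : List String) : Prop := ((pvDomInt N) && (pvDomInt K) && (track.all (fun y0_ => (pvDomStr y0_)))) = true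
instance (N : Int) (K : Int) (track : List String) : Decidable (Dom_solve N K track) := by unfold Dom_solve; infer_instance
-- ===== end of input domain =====

-- B replaces A's 2xNx2 cost-propagation table by a combinatorial argument: every move
-- costs 1, so a distance is (N-1) plus the number of lane changes along the sequence of
-- forced lanes (half-blocked columns), and the trip is dead iff a column is fully blocked
-- or two adjacent columns force different lanes (objective: alternative algorithm).

-- ===== PORT A =====
def INFv : Int := 1000000000000000000

-- track[r][c] via PySem pyGet? (the default is never reached on indices A uses under Pre_)
def chAt (track : List String) (r c : Int) : Char :=
  (PySem.Str.pyGet? ((PySem.List.pyGet? track r).getD "") c).getD ' '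

-- memo[r][c][s] read, exact via PySem pyGet?
def get3 (m : List (List (List Int))) (r c s : Int) : Int :=
  (PySem.List.pyGet? ((PySem.List.pyGet? ((PySem.List.pyGet? m r).getD []) c).getD []) s).getD 0

-- memo[r][c][s] = v (exact for the nonnegative in-range indices A writes under Pre_)
def set3 (m : List (List (List Int))) (r c s : Int) (v : Int) : List (List (List Int)) :=
  let row := (PySem.List.pyGet? m r).getD []
  let cell := (PySem.List.pyGet? row c).getD []
  m.set r.toNat (row.set c.toNat (cell.set s.toNat v))

-- body of `for col in range(1, N)` for a fixed `start` (A's two row passes, verbatim)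
def colStep (track : List String) (start : Int) (m : List (List (List Int))) (col : Int) :
    List (List (List Int)) :=
  let m := (PySem.List.pyRange 0 2).foldl (fun m row =>
    if chAt track row col = '#' then m
    else set3 m row col start (min (get3 m row col start) (get3 m row (col - 1) start + 1))) m
  (PySem.List.pyRange 0 2).foldl (fun m row =>
    if chAt track row col = '#' then m
    else set3 m row col start (min (get3 m row col start) (get3 m (1 - row) col start + 1))) m

-- body of `for start in range(2)`
def startStep (track : List String) (N : Int) (m : List (List (List Int))) (start : Int) :
    List (List (List Int)) :=
  (PySem.List.pyRange 1 N).foldl (colStep track start) m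

def solve (N : Int) (K : Int) (track : List String) : Int :=
  let memo0 : List (List (List Int)) :=
    (PySem.List.pyRange 0 2).map (fun _ => (PySem.List.pyRange 0 N).map (fun _ => [INFv, INFv]))
  let m1 := set3 memo0 0 0 0 (if chAt track 0 0 = '.' then 0 else INFv)
  let m2 := set3 m1 1 0 1 (if chAt track 1 0 = '.' then 0 else INFv)
  let m3 := set3 m2 0 0 1 (if chAt track 0 0 = '.' then min (get3 m2 0 0 1) (get3 m2 1 0 1 + 1) else INFv)
  let m4 := set3 m3 1 0 0 (if chAt track 1 0 = '.' then min (get3 m3 1 0 0) (get3 m3 0 0 0 + 1) else INFv)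
  let memo := (PySem.List.pyRange 0 2).foldl (startStep track N) m4
  if K = 1 then
    let result := min (min (min (min INFv (get3 memo 0 (-1) 0)) (get3 memo 0 (-1) 1)) (get3 memo 1 (-1) 0)) (get3 memo 1 (-1) 1)
    if result < INFv then result else -1
  else
    let result := INFv
    let result := if chAt track 0 0 ≠ '#' ∧ chAt track 0 (-1) ≠ '#' then
        min result (min (get3 memo 0 (-1) 0) (get3 memo 0 (-1) 1) + get3 memo 0 (-1) 0 * (K - 2) + min (get3 memo 0 (-1) 0) (get3 memo 1 (-1) 0) + (K - 1))
      else result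
    let result := if chAt track 1 0 ≠ '#' ∧ chAt track 1 (-1) ≠ '#' then
        min result (min (get3 memo 1 (-1) 0) (get3 memo 1 (-1) 1) + get3 memo 1 (-1) 1 * (K - 2) + min (get3 memo 0 (-1) 1) (get3 memo 1 (-1) 1) + (K - 1))
      else result
    if result < INFv then result else -1

-- ===== PORT B =====
-- Source B's `blocked(l, c)`: column 0 is passable only at '.', later columns wherever not '#'
def pyBlocked (track : List String) (l c : Int) : Bool :=
  if c = 0 then
    decide ((PySem.Str.pyGet? ((PySem.List.pyGet? track l).getD "") c).getD ' ' ≠ '.')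
  else
    decide ((PySem.Str.pyGet? ((PySem.List.pyGet? track l).getD "") c).getD ' ' = '#')

-- loop body of Source B's scan over columns: (dead-so-far, forced (column, lane) pairs)
def scanBody (track : List String) (acc : Bool × List (Int × Int)) (c : Int) :
    Bool × List (Int × Int) :=
  if pyBlocked track 0 c && pyBlocked track 1 c then (true, acc.2)
  else if pyBlocked track 0 c then (acc.1, acc.2 ++ [(c, 1)])
  else if pyBlocked track 1 c then (acc.1, acc.2 ++ [(c, 0)])
  else acc

-- Source B's `dist(s, r)`
def distApart (N : Int) (track : List String) (dead : Bool) (lanes : List Int) (s r : Int) : Int :=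
  if dead || pyBlocked track s 0 || pyBlocked track r (N - 1) then INFv
  else
    let seq := [s] ++ lanes ++ [r]
    (N - 1) + (seq.zip seq.tail).foldl (fun a p => a + (if p.1 ≠ p.2 then 1 else 0)) 0

def solve_alt (N : Int) (K : Int) (track : List String) : Int :=
  let sc := (PySem.List.pyRange 0 N).foldl (scanBody track) (false, [])
  let dead := sc.1 ||
    ((sc.2.zip sc.2.tail).any fun p => decide (p.2.1 = p.1.1 + 1) && decide (¬ p.1.2 = p.2.2))
  let lanes := sc.2.map Prod.snd
  let e00 := distApart N track dead lanes 0 0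
  let e10 := distApart N track dead lanes 0 1
  let e01 := distApart N track dead lanes 1 0
  let e11 := distApart N track dead lanes 1 1
  if K = 1 then
    let best := min (min (min e00 e01) e10) e11
    if best < INFv then best else -1
  else
    let result := INFv
    let result := if (PySem.Str.pyGet? ((PySem.List.pyGet? track 0).getD "") 0).getD ' ' ≠ '#' ∧
        (PySem.Str.pyGet? ((PySem.List.pyGet? track 0).getD "") (-1)).getD ' ' ≠ '#' then
        min result (min e00 e01 + e00 * (K - 2) + min e00 e10 + (K - 1)) else result
    let result := if (PySem.Str.pyGet? ((PySem.List.pyGet? track 1).getD "") 0).getD ' ' ≠ '#' ∧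
        (PySem.Str.pyGet? ((PySem.List.pyGet? track 1).getD "") (-1)).getD ' ' ≠ '#' then
        min result (min e10 e11 + e11 * (K - 2) + min e01 e11 + (K - 1)) else result
    if result < INFv then result else -1

-- ===== PRECONDITION & SPEC =====
-- Pre_ is exactly where A returns normally: A raises IndexError when N < 1, when there are
-- fewer than two track rows, or when one of the first two rows is shorter than N.
def Pre_solve (N : Int) (K : Int) (track : List String) : Prop :=
  1 ≤ N ∧ 2 ≤ track.length ∧
  N ≤ PySem.Str.len ((PySem.List.pyGet? track 0).getD "") ∧
  N ≤ PySem.Str.len ((PySem.List.pyGet? track 1).getD "")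
instance (N : Int) (K : Int) (track : List String) : Decidable (Pre_solve N K track) := by
  unfold Pre_solve; infer_instance

def pvWitness_solve : Int × Int × List String := (2, 2, ["..", ".."])

def Spec_solve (N : Int) (K : Int) (track : List String) (out : Int) : Prop := out = solve_alt N K track
instance (N : Int) (K : Int) (track : List String) (out : Int) : Decidable (Spec_solve N K track out) := by unfold Spec_solve; infer_instance

-- ===== CLAIM (what is proved, stated in full; the proofs are below) =====
def Claim_equal_solve : Prop := ∀ (N : Int) (K : Int) (track : List String), Dom_solve N K track → Pre_solve N K track → Spec_solve N K track (solve N K track)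

-- ===== LEMMAS AND PROOFS =====

def memoBuild (g : Nat → Nat → Nat → Int) (n : Nat) : List (List (List Int)) :=
  [(List.range n).map (fun c => [g 0 c 0, g 0 c 1]),
   (List.range n).map (fun c => [g 1 c 0, g 1 c 1])]

theorem get3_memoBuild (g : Nat → Nat → Nat → Int) (n r c s : Nat)
    (hr : r < 2) (hc : c < n) (hs : s < 2) :
    get3 (memoBuild g n) (r : Int) (c : Int) (s : Int) = g r c s := by
  interval_cases r <;> interval_cases s <;>
    simp [get3, memoBuild, PySem.List.pyGet?_natCast, List.getElem?_map, hc,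
      List.getElem?_range, Nat.cast_ofNat]

theorem get3_memoBuild_neg (g : Nat → Nat → Nat → Int) (n r s : Nat)
    (hr : r < 2) (hn : 1 ≤ n) (hs : s < 2) :
    get3 (memoBuild g n) (r : Int) (-1) (s : Int) = g r (n - 1) s := by
  have hlast : ∀ f : Nat → List Int, ((List.range n).map f).getLast? = some (f (n-1)) := by
    intro f
    rw [List.getLast?_eq_getElem?]
    have h1 : n - 1 < n := by omega
    simp [List.getElem?_map, List.getElem?_range, h1]
  interval_cases r <;> interval_cases s <;>
    simp [get3, memoBuild, PySem.List.pyGet?_natCast, PySem.List.pyGet?_neg_one, hlast,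
      Nat.cast_ofNat]

theorem memoBuild_congr (g g' : Nat → Nat → Nat → Int) (n : Nat)
    (h : ∀ r c s, r < 2 → c < n → s < 2 → g r c s = g' r c s) :
    memoBuild g n = memoBuild g' n := by
  simp only [memoBuild, List.cons.injEq, and_true]
  refine ⟨List.map_congr_left ?_, List.map_congr_left ?_⟩ <;>
    intro c hc <;> rw [List.mem_range] at hc <;>
    simp [h 0 c 0 (by omega) hc (by omega), h 0 c 1 (by omega) hc (by omega),
      h 1 c 0 (by omega) hc (by omega), h 1 c 1 (by omega) hc (by omega)]

theorem set3_memoBuild (g : Nat → Nat → Nat → Int) (n r c s : Nat)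
    (hr : r < 2) (hc : c < n) (hs : s < 2) (v : Int) :
    set3 (memoBuild g n) (r : Int) (c : Int) (s : Int) v
      = memoBuild (fun r' c' s' => if r' = r ∧ c' = c ∧ s' = s then v else g r' c' s') n := by
  have e0 : PySem.List.pyGet? (memoBuild g n) 0
      = some ((List.range n).map (fun c' => [g 0 c' 0, g 0 c' 1])) := by
    simp [memoBuild, PySem.List.pyGet?_zero_cons]
  have e1 : PySem.List.pyGet? (memoBuild g n) 1
      = some ((List.range n).map (fun c' => [g 1 c' 0, g 1 c' 1])) := by
    simp [memoBuild, PySem.List.pyGet?, PySem.List.pyIdx?]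
  have ec : ∀ R : Nat, PySem.List.pyGet? ((List.range n).map (fun c' => [g R c' 0, g R c' 1])) (c : Int)
      = some [g R c 0, g R c 1] := by
    intro R
    simp [PySem.List.pyGet?_natCast, List.getElem?_map, List.getElem?_range, hc]
  have hrow : ∀ (R : Nat) (x : List Int),
      ((List.range n).map (fun c' => [g R c' 0, g R c' 1])).set c x
        = (List.range n).map (fun c' => if c' = c then x else [g R c' 0, g R c' 1]) := by
    intro R x
    apply List.ext_getElem
    · simp
    · intro i h1 h2
      simp only [List.length_set, List.length_map, List.length_range] at h1
      simp [List.getElem_set, List.getElem_map, List.getElem_range, h1, eq_comm]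
  interval_cases r <;> interval_cases s <;>
    (simp only [Nat.cast_zero, Nat.cast_one, set3, e0, e1, ec, Option.getD_some,
       Int.toNat_natCast, Int.toNat_zero, Int.toNat_one, List.set]
     rw [hrow]
     simp only [memoBuild]
     refine List.cons_eq_cons.mpr ⟨?_, List.cons_eq_cons.mpr ⟨?_, rfl⟩⟩ <;>
       apply List.map_congr_left <;> intro c' hc' <;> rw [List.mem_range] at hc' <;>
       by_cases h : c' = c <;> simp [h])

def stepA (a b : Char) (d : Int × Int) : Int × Int :=
  let s0 := if a ≠ '#' then min INFv (d.1 + 1) else INFv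
  let s1 := if b ≠ '#' then min INFv (d.2 + 1) else INFv
  let n0 := if a ≠ '#' then min s0 (s1 + 1) else s0
  (n0, if b ≠ '#' then min s1 (n0 + 1) else s1)

theorem pyRange02 : PySem.List.pyRange 0 2 = [0, 1] := by decide

theorem get3_mb0 (g : Nat → Nat → Nat → Int) (n c s : Nat) (hc : c < n) (hs : s < 2) :
    get3 (memoBuild g n) 0 (c : Int) (s : Int) = g 0 c s := by
  have h := get3_memoBuild g n 0 c s (by omega) hc hs
  simpa using h

theorem get3_mb1 (g : Nat → Nat → Nat → Int) (n c s : Nat) (hc : c < n) (hs : s < 2) :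
    get3 (memoBuild g n) 1 (c : Int) (s : Int) = g 1 c s := by
  have h := get3_memoBuild g n 1 c s (by omega) hc hs
  simpa using h

theorem set3_mb0 (g : Nat → Nat → Nat → Int) (n c s : Nat) (hc : c < n) (hs : s < 2) (v : Int) :
    set3 (memoBuild g n) 0 (c : Int) (s : Int) v
      = memoBuild (fun r' c' s' => if r' = 0 ∧ c' = c ∧ s' = s then v else g r' c' s') n := by
  have h := set3_memoBuild g n 0 c s (by omega) hc hs v
  simpa using h

theorem set3_mb1 (g : Nat → Nat → Nat → Int) (n c s : Nat) (hc : c < n) (hs : s < 2) (v : Int) :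
    set3 (memoBuild g n) 1 (c : Int) (s : Int) v
      = memoBuild (fun r' c' s' => if r' = 1 ∧ c' = c ∧ s' = s then v else g r' c' s') n := by
  have h := set3_memoBuild g n 1 c s (by omega) hc hs v
  simpa using h

theorem get3_mb0' (g : Nat → Nat → Nat → Int) (n c s : Nat) (hc : c + 1 < n) (hs : s < 2) :
    get3 (memoBuild g n) 0 ((c : Int) + 1) (s : Int) = g 0 (c + 1) s := by
  have h := get3_mb0 g n (c + 1) s hc hs
  push_cast at h
  exact h

theorem get3_mb1' (g : Nat → Nat → Nat → Int) (n c s : Nat) (hc : c + 1 < n) (hs : s < 2) :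
    get3 (memoBuild g n) 1 ((c : Int) + 1) (s : Int) = g 1 (c + 1) s := by
  have h := get3_mb1 g n (c + 1) s hc hs
  push_cast at h
  exact h

theorem set3_mb0' (g : Nat → Nat → Nat → Int) (n c s : Nat) (hc : c + 1 < n) (hs : s < 2) (v : Int) :
    set3 (memoBuild g n) 0 ((c : Int) + 1) (s : Int) v
      = memoBuild (fun r' c' s' => if r' = 0 ∧ c' = c + 1 ∧ s' = s then v else g r' c' s') n := by
  have h := set3_mb0 g n (c + 1) s hc hs v
  push_cast at h
  exact h

theorem set3_mb1' (g : Nat → Nat → Nat → Int) (n c s : Nat) (hc : c + 1 < n) (hs : s < 2) (v : Int) :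
    set3 (memoBuild g n) 1 ((c : Int) + 1) (s : Int) v
      = memoBuild (fun r' c' s' => if r' = 1 ∧ c' = c + 1 ∧ s' = s then v else g r' c' s') n := by
  have h := set3_mb1 g n (c + 1) s hc hs v
  push_cast at h
  exact h

theorem colStep_memoBuild (track : List String) (n s c : Nat) (hs : s < 2) (hc : c + 1 < n)
    (T : Nat → Nat → Nat → Int)
    (hT0 : T 0 (c + 1) s = INFv) (hT1 : T 1 (c + 1) s = INFv) :
    colStep track (s : Int) (memoBuild T n) ((c : Int) + 1)
      = memoBuild (fun r' c' s' =>
          if s' = s ∧ c' = c + 1 then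
            (if r' = 0 then (stepA (chAt track 0 ((c : Int) + 1)) (chAt track 1 ((c : Int) + 1)) (T 0 c s, T 1 c s)).1
             else (stepA (chAt track 0 ((c : Int) + 1)) (chAt track 1 ((c : Int) + 1)) (T 0 c s, T 1 c s)).2)
          else T r' c' s') n := by
  have e11 : (1 : Int) - 1 = 0 := by norm_num
  have e10 : (1 : Int) - 0 = 1 := by norm_num
  have ecc : ((c : Int) + 1) - 1 = (c : Int) := by ring
  by_cases ha : chAt track 0 ((c : Int) + 1) = '#' <;>
    by_cases hb : chAt track 1 ((c : Int) + 1) = '#'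
  · simp only [colStep, pyRange02, List.foldl_cons, List.foldl_nil, if_pos ha, if_pos hb]
    apply memoBuild_congr
    intro r' c' s' hr' hcc' hs'
    by_cases h : s' = s ∧ c' = c + 1
    · obtain ⟨rfl, rfl⟩ := h
      interval_cases r' <;> simp [stepA, ha, hb, hT0, hT1]
    · simp [h]
  · simp only [colStep, pyRange02, List.foldl_cons, List.foldl_nil, if_pos ha, if_neg hb,
      e11, e10, ecc]
    rw [get3_mb1' T n c s hc hs, get3_mb1 T n c s (by omega) hs, set3_mb1' T n c s hc hs]
    rw [get3_mb1' _ n c s hc hs, get3_mb0' _ n c s hc hs, set3_mb1' _ n c s hc hs]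
    apply memoBuild_congr
    intro r' c' s' hr' hcc' hs'
    by_cases h : s' = s ∧ c' = c + 1
    · obtain ⟨rfl, rfl⟩ := h
      interval_cases r' <;>
        simp [stepA, ha, hb, hT0, hT1, show ¬(c + 1 = c) from by omega,
          show ¬(c = c + 1) from by omega]
    · rcases Decidable.not_and_iff_not_or_not.mp h with h' | h' <;>
        simp [h'] <;> intros <;> omega
  · simp only [colStep, pyRange02, List.foldl_cons, List.foldl_nil, if_neg ha, if_pos hb,
      e11, e10, ecc]
    rw [get3_mb0' T n c s hc hs, get3_mb0 T n c s (by omega) hs, set3_mb0' T n c s hc hs]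
    rw [get3_mb0' _ n c s hc hs, get3_mb1' _ n c s hc hs, set3_mb0' _ n c s hc hs]
    apply memoBuild_congr
    intro r' c' s' hr' hcc' hs'
    by_cases h : s' = s ∧ c' = c + 1
    · obtain ⟨rfl, rfl⟩ := h
      interval_cases r' <;>
        simp [stepA, ha, hb, hT0, hT1, show ¬(c + 1 = c) from by omega,
          show ¬(c = c + 1) from by omega]
    · rcases Decidable.not_and_iff_not_or_not.mp h with h' | h' <;>
        simp [h'] <;> intros <;> omega
  · simp only [colStep, pyRange02, List.foldl_cons, List.foldl_nil, if_neg ha, if_neg hb,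
      e11, e10, ecc]
    rw [get3_mb0' T n c s hc hs, get3_mb0 T n c s (by omega) hs, set3_mb0' T n c s hc hs]
    rw [get3_mb1' _ n c s hc hs, get3_mb1 _ n c s (by omega) hs, set3_mb1' _ n c s hc hs]
    rw [get3_mb0' _ n c s hc hs, get3_mb1' _ n c s hc hs, set3_mb0' _ n c s hc hs]
    rw [get3_mb1' _ n c s hc hs, get3_mb0' _ n c s hc hs, set3_mb1' _ n c s hc hs]
    apply memoBuild_congr
    intro r' c' s' hr' hcc' hs'
    by_cases h : s' = s ∧ c' = c + 1
    · obtain ⟨rfl, rfl⟩ := h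
      interval_cases r' <;>
        simp [stepA, ha, hb, hT0, hT1, show ¬(c + 1 = c) from by omega,
          show ¬(c = c + 1) from by omega]
    · rcases Decidable.not_and_iff_not_or_not.mp h with h' | h' <;>
        simp [h'] <;> intros <;> omega

def initTab (track : List String) : Nat → Nat → Nat → Int := fun r c s =>
  if c = 0 then
    if r = 0 ∧ s = 0 then (if chAt track 0 0 = '.' then 0 else INFv)
    else if r = 1 ∧ s = 1 then (if chAt track 1 0 = '.' then 0 else INFv)
    else if r = 0 ∧ s = 1 then
      (if chAt track 0 0 = '.' then
        min INFv ((if chAt track 1 0 = '.' then 0 else INFv) + 1) else INFv)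
    else
      (if chAt track 1 0 = '.' then
        min INFv ((if chAt track 0 0 = '.' then 0 else INFv) + 1) else INFv)
  else INFv

def vpair (track : List String) (s : Nat) : Nat → Int × Int
  | 0 => (initTab track 0 0 s, initTab track 1 0 s)
  | c + 1 => stepA (chAt track 0 ((c : Int) + 1)) (chAt track 1 ((c : Int) + 1)) (vpair track s c)

def passTab (g : Nat → Nat → Nat → Int) (track : List String) (s c : Nat) :
    Nat → Nat → Nat → Int := fun r c' s' =>
  if s' = s ∧ c' ≤ c then (if r = 0 then (vpair track s c').1 else (vpair track s c').2)
  else g r c' s'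

theorem passFold (track : List String) (n : Nat) (s : Nat) (hs : s < 2)
    (g : Nat → Nat → Nat → Int)
    (hg0 : ∀ r, r < 2 → g r 0 s = (if r = 0 then (vpair track s 0).1 else (vpair track s 0).2))
    (hg : ∀ r c, r < 2 → 1 ≤ c → c < n → g r c s = INFv) :
    ∀ c : Nat, c < n →
      (PySem.List.pyRange 1 ((c : Int) + 1)).foldl (colStep track (s : Int)) (memoBuild g n)
        = memoBuild (passTab g track s c) n := by
  intro c
  induction c with
  | zero =>
    intro _
    rw [show ((0 : Nat) : Int) + 1 = 1 by norm_num, PySem.List.pyRange_one_eq_nil (by norm_num)]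
    simp only [List.foldl_nil]
    apply memoBuild_congr
    intro r' c' s' hr' hc' hs'
    simp only [passTab]
    by_cases h : s' = s ∧ c' ≤ 0
    · obtain ⟨rfl, hc0⟩ := h
      interval_cases c'
      rw [if_pos ⟨rfl, le_refl 0⟩, hg0 r' hr']
    · rw [if_neg h]
  | succ c ih =>
    intro hc
    have hcn : c < n := by omega
    have hl : PySem.List.pyRange 1 (((c + 1 : Nat) : Int) + 1)
        = PySem.List.pyRange 1 ((c : Int) + 1) ++ [(c : Int) + 1] := by
      push_cast
      exact PySem.List.pyRange_one_succ_right (by omega)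
    rw [hl, List.foldl_append, ih hcn, List.foldl_cons, List.foldl_nil]
    rw [colStep_memoBuild track n s c hs hc _
      (by simp [passTab, hg 0 (c+1) (by omega) (by omega) hc])
      (by simp [passTab, hg 1 (c+1) (by omega) (by omega) hc])]
    apply memoBuild_congr
    intro r' c' s' hr' hc' hs'
    have hv : vpair track s (c + 1)
        = stepA (chAt track 0 ((c : Int) + 1)) (chAt track 1 ((c : Int) + 1)) (vpair track s c) := rfl
    by_cases h : s' = s ∧ c' = c + 1
    · simp [passTab, h.1, h.2, hv]
    · by_cases h2 : s' = s ∧ c' ≤ c + 1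
      · have h3 : c' ≤ c := by omega
        simp [passTab, h, h2.1, h3, h2.2]
        exact fun h4 => absurd h4 (by omega)
      · have h3 : ¬(s' = s ∧ c' ≤ c) := by omega
        simp [passTab, h, h2, h3]

theorem memo0_eq (track : List String) (n : Nat) :
    ((PySem.List.pyRange 0 2).map (fun _ => (PySem.List.pyRange 0 ((n : Nat) : Int)).map (fun _ => ([INFv, INFv] : List Int))))
      = memoBuild (fun _ _ _ => INFv) n := by
  rw [pyRange02, PySem.List.pyRange_zero_natCast]
  simp [memoBuild, List.map_map, Function.comp_def]

theorem m4_eq (track : List String) (n : Nat) (hn : 1 ≤ n) :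
    (set3 (set3 (set3 (set3 (memoBuild (fun _ _ _ => INFv) n)
        0 0 0 (if chAt track 0 0 = '.' then 0 else INFv))
        1 0 1 (if chAt track 1 0 = '.' then 0 else INFv))
        0 0 1 (if chAt track 0 0 = '.' then
          min (get3 (set3 (set3 (memoBuild (fun _ _ _ => INFv) n)
              0 0 0 (if chAt track 0 0 = '.' then 0 else INFv))
              1 0 1 (if chAt track 1 0 = '.' then 0 else INFv)) 0 0 1)
              (get3 (set3 (set3 (memoBuild (fun _ _ _ => INFv) n)
              0 0 0 (if chAt track 0 0 = '.' then 0 else INFv))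
              1 0 1 (if chAt track 1 0 = '.' then 0 else INFv)) 1 0 1 + 1) else INFv))
        1 0 0 (if chAt track 1 0 = '.' then
          min (get3 (set3 (set3 (set3 (memoBuild (fun _ _ _ => INFv) n)
              0 0 0 (if chAt track 0 0 = '.' then 0 else INFv))
              1 0 1 (if chAt track 1 0 = '.' then 0 else INFv))
              0 0 1 (if chAt track 0 0 = '.' then
                min (get3 (set3 (set3 (memoBuild (fun _ _ _ => INFv) n)
                    0 0 0 (if chAt track 0 0 = '.' then 0 else INFv))
                    1 0 1 (if chAt track 1 0 = '.' then 0 else INFv)) 0 0 1)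
                    (get3 (set3 (set3 (memoBuild (fun _ _ _ => INFv) n)
                    0 0 0 (if chAt track 0 0 = '.' then 0 else INFv))
                    1 0 1 (if chAt track 1 0 = '.' then 0 else INFv)) 1 0 1 + 1) else INFv)) 1 0 0)
              (get3 (set3 (set3 (set3 (memoBuild (fun _ _ _ => INFv) n)
              0 0 0 (if chAt track 0 0 = '.' then 0 else INFv))
              1 0 1 (if chAt track 1 0 = '.' then 0 else INFv))
              0 0 1 (if chAt track 0 0 = '.' then
                min (get3 (set3 (set3 (memoBuild (fun _ _ _ => INFv) n)
                    0 0 0 (if chAt track 0 0 = '.' then 0 else INFv))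
                    1 0 1 (if chAt track 1 0 = '.' then 0 else INFv)) 0 0 1)
                    (get3 (set3 (set3 (memoBuild (fun _ _ _ => INFv) n)
                    0 0 0 (if chAt track 0 0 = '.' then 0 else INFv))
                    1 0 1 (if chAt track 1 0 = '.' then 0 else INFv)) 1 0 1 + 1) else INFv)) 0 0 0 + 1)
          else INFv))
      = memoBuild (initTab track) n := by
  have S0 : ∀ (g : Nat → Nat → Nat → Int) (v : Int), set3 (memoBuild g n) 0 0 0 v
      = memoBuild (fun r' c' s' => if r' = 0 ∧ c' = 0 ∧ s' = 0 then v else g r' c' s') n := by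
    intro g v
    have h := set3_mb0 g n 0 0 (by omega) (by omega) v
    push_cast at h
    exact h
  have S11 : ∀ (g : Nat → Nat → Nat → Int) (v : Int), set3 (memoBuild g n) 1 0 1 v
      = memoBuild (fun r' c' s' => if r' = 1 ∧ c' = 0 ∧ s' = 1 then v else g r' c' s') n := by
    intro g v
    have h := set3_mb1 g n 0 1 (by omega) (by omega) v
    push_cast at h
    exact h
  have S01 : ∀ (g : Nat → Nat → Nat → Int) (v : Int), set3 (memoBuild g n) 0 0 1 v
      = memoBuild (fun r' c' s' => if r' = 0 ∧ c' = 0 ∧ s' = 1 then v else g r' c' s') n := by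
    intro g v
    have h := set3_mb0 g n 0 1 (by omega) (by omega) v
    push_cast at h
    exact h
  have S10 : ∀ (g : Nat → Nat → Nat → Int) (v : Int), set3 (memoBuild g n) 1 0 0 v
      = memoBuild (fun r' c' s' => if r' = 1 ∧ c' = 0 ∧ s' = 0 then v else g r' c' s') n := by
    intro g v
    have h := set3_mb1 g n 0 0 (by omega) (by omega) v
    push_cast at h
    exact h
  have G01 : ∀ g : Nat → Nat → Nat → Int, get3 (memoBuild g n) 0 0 1 = g 0 0 1 := by
    intro g
    have h := get3_mb0 g n 0 1 (by omega) (by omega)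
    push_cast at h
    exact h
  have G11 : ∀ g : Nat → Nat → Nat → Int, get3 (memoBuild g n) 1 0 1 = g 1 0 1 := by
    intro g
    have h := get3_mb1 g n 0 1 (by omega) (by omega)
    push_cast at h
    exact h
  have G10 : ∀ g : Nat → Nat → Nat → Int, get3 (memoBuild g n) 1 0 0 = g 1 0 0 := by
    intro g
    have h := get3_mb1 g n 0 0 (by omega) (by omega)
    push_cast at h
    exact h
  have G00 : ∀ g : Nat → Nat → Nat → Int, get3 (memoBuild g n) 0 0 0 = g 0 0 0 := by
    intro g
    have h := get3_mb0 g n 0 0 (by omega) (by omega)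
    push_cast at h
    exact h
  rw [S0, S11]
  rw [G01, G11]
  rw [S01]
  rw [G10, G00]
  rw [S10]
  apply memoBuild_congr
  intro r' c' s' hr' hc' hs'
  by_cases hc0 : c' = 0
  · subst hc0
    interval_cases r' <;> interval_cases s' <;> simp [initTab]
  · simp [initTab, hc0]

def finTab (track : List String) (n : Nat) : Nat → Nat → Nat → Int :=
  passTab (passTab (initTab track) track 0 (n - 1)) track 1 (n - 1)

theorem startFold (track : List String) (n : Nat) (hn : 1 ≤ n) :
    (PySem.List.pyRange 0 2).foldl (startStep track ((n : Nat) : Int)) (memoBuild (initTab track) n)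
      = memoBuild (finTab track n) n := by
  have hcast : ((n : Nat) : Int) = ((n - 1 : Nat) : Int) + 1 := by omega
  have P0 := passFold track n 0 (by omega) (initTab track)
    (by intro r hr; interval_cases r <;> rfl)
    (by intro r c hr h1 h2; simp [initTab, show ¬(c = 0) from by omega])
    (n - 1) (by omega)
  have P1 := passFold track n 1 (by omega) (passTab (initTab track) track 0 (n - 1))
    (by intro r hr; interval_cases r <;> simp [passTab, vpair])
    (by intro r c hr h1 h2; simp [passTab, initTab, show ¬(c = 0) from by omega])
    (n - 1) (by omega)
  push_cast at P0 P1
  rw [pyRange02, List.foldl_cons, List.foldl_cons, List.foldl_nil, startStep, startStep, hcast]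
  push_cast
  rw [P0, P1]
  rfl

-- ===== B-side characterization =====

-- forced-lane scan state by column (same step as the port's fold)
def stScan (track : List String) : Nat → Bool × List (Int × Int)
  | 0 => scanBody track (false, []) 0
  | c + 1 => scanBody track (stScan track c) ((c : Int) + 1)

def lanesSpec (track : List String) (c : Nat) : List Int := ((stScan track c).2).map Prod.snd

-- dead up to column c: a fully blocked column, or adjacent columns forcing different lanes
def deadSpec (track : List String) : Nat → Bool
  | 0 => pyBlocked track 0 0 && pyBlocked track 1 0
  | c + 1 => deadSpec track c ||
      (if pyBlocked track 0 ((c : Int) + 1) then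
         (if pyBlocked track 1 ((c : Int) + 1) then true else pyBlocked track 1 (c : Int))
       else if pyBlocked track 1 ((c : Int) + 1) then pyBlocked track 0 (c : Int) else false)

-- number of lane changes along x :: l
def chg : Int → List Int → Int
  | _, [] => 0
  | x, y :: t => (if x ≠ y then 1 else 0) + chg y t

-- the claimed value of A's memo[r][c][s]
def Dfun (track : List String) (s : Int) (c : Nat) (r : Int) : Int :=
  if deadSpec track c || pyBlocked track s 0 || pyBlocked track r (c : Int) then INFv
  else (c : Int) + chg s (lanesSpec track c) + (if (lanesSpec track c).getLastD s ≠ r then 1 else 0)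

theorem chg_nonneg (x : Int) (l : List Int) : 0 ≤ chg x l := by
  induction l generalizing x with
  | nil => simp [chg]
  | cons y t ih => simp only [chg]; have := ih y; split_ifs <;> omega

theorem chg_le (x : Int) (l : List Int) : chg x l ≤ l.length := by
  induction l generalizing x with
  | nil => simp [chg]
  | cons y t ih =>
    simp only [chg, List.length_cons]
    have := ih y
    split_ifs <;> push_cast <;> omega

theorem chg_concat (x y : Int) (l : List Int) :
    chg x (l ++ [y]) = chg x l + (if l.getLastD x ≠ y then 1 else 0) := by
  induction l generalizing x with
  | nil => simp [chg]
  | cons z t ih =>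
    simp only [List.cons_append, chg, ih z, List.getLastD_cons]
    split_ifs <;> omega

theorem getLastD_mem (l : List Int) (x : Int) : l.getLastD x = x ∨ l.getLastD x ∈ l := by
  induction l generalizing x with
  | nil => left; rfl
  | cons y t ih =>
    rw [List.getLastD_cons]
    rcases ih y with h | h
    · right; rw [h]; exact List.mem_cons_self
    · right; exact List.mem_cons_of_mem _ h

theorem pyBlocked_succ (track : List String) (l : Int) (c : Nat) :
    pyBlocked track l ((c : Int) + 1) = decide (chAt track l ((c : Int) + 1) = '#') := by
  simp [pyBlocked, chAt, show ¬((c : Int) + 1 = 0) by omega]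

theorem pyBlocked_zero (track : List String) (l : Int) :
    pyBlocked track l 0 = decide (chAt track l 0 ≠ '.') := by
  simp [pyBlocked, chAt]

theorem stScan_mem01 (track : List String) (c : Nat) :
    ∀ p ∈ (stScan track c).2, p.2 = 0 ∨ p.2 = 1 := by
  induction c with
  | zero =>
    simp only [stScan, scanBody]
    split_ifs <;> simp
  | succ c ih =>
    simp only [stScan, scanBody]
    split_ifs <;> intro p hp <;>
      first
        | exact ih p hp
        | (rcases List.mem_append.mp hp with h | h
           · exact ih p h
           · simp only [List.mem_singleton] at h; subst h; simp)

theorem lanes_mem01 (track : List String) (c : Nat) :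
    ∀ x ∈ lanesSpec track c, x = 0 ∨ x = 1 := by
  intro x hx
  rcases List.mem_map.mp hx with ⟨p, hp, rfl⟩
  exact stScan_mem01 track c p hp

-- positions recorded by the scan: in range, and at column c only if c is forced
theorem stScan_pos (track : List String) (c : Nat) :
    ∀ p ∈ (stScan track c).2, p.1 ≤ (c : Int) ∧
      (p.1 = (c : Int) → pyBlocked track (1 - p.2) p.1 = true ∧ pyBlocked track p.2 p.1 = false) := by
  induction c with
  | zero =>
    simp only [stScan, scanBody, Nat.cast_zero]
    split_ifs with h1 h2 h3 <;> intro p hp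
    · simp at hp
    · simp only [List.nil_append, List.mem_singleton] at hp
      subst hp
      simp only [Bool.and_eq_true] at h1
      refine ⟨le_refl _, fun _ => ⟨by norm_num; exact h2, ?_⟩⟩
      norm_num
      cases hb : pyBlocked track 1 0
      · rfl
      · exact absurd ⟨h2, hb⟩ h1
    · simp only [List.nil_append, List.mem_singleton] at hp
      subst hp
      refine ⟨le_refl _, fun _ => ⟨by norm_num; exact h3, ?_⟩⟩
      norm_num
      exact Bool.of_not_eq_true h2
    · simp at hp
  | succ c ih =>
    simp only [stScan, scanBody]
    split_ifs with h1 h2 h3 <;> intro p hp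
    · have h := ih p hp
      push_cast
      exact ⟨by omega, fun hc => absurd hc (by omega)⟩
    · rcases List.mem_append.mp hp with h | h
      · have h' := ih p h
        push_cast
        exact ⟨by omega, fun hc => absurd hc (by omega)⟩
      · simp only [List.mem_singleton] at h
        subst h
        simp only [Bool.and_eq_true] at h1
        refine ⟨by push_cast; omega, fun _ => ⟨by norm_num; exact h2, ?_⟩⟩
        norm_num
        cases hb : pyBlocked track 1 ((c : Int) + 1)
        · rfl
        · exact absurd ⟨h2, hb⟩ h1
    · rcases List.mem_append.mp hp with h | h
      · have h' := ih p h
        push_cast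
        exact ⟨by omega, fun hc => absurd hc (by omega)⟩
      · simp only [List.mem_singleton] at h
        subst h
        refine ⟨by push_cast; omega, fun _ => ⟨by norm_num; exact h3, ?_⟩⟩
        norm_num
        exact Bool.of_not_eq_true h2
    · have h := ih p hp
      push_cast
      exact ⟨by omega, fun hc => absurd hc (by omega)⟩

theorem stScan_last1 (track : List String) (c : Nat)
    (h0 : pyBlocked track 0 (c : Int) = true) (h1 : pyBlocked track 1 (c : Int) = false) :
    (stScan track c).2.getLast? = some ((c : Int), 1) := by
  cases c with
  | zero =>
    simp only [Nat.cast_zero] at h0 h1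
    simp [stScan, scanBody, h0, h1]
  | succ c =>
    push_cast at h0 h1 ⊢
    simp [stScan, scanBody, h0, h1, List.getLast?_append]

theorem stScan_last0 (track : List String) (c : Nat)
    (h0 : pyBlocked track 0 (c : Int) = false) (h1 : pyBlocked track 1 (c : Int) = true) :
    (stScan track c).2.getLast? = some ((c : Int), 0) := by
  cases c with
  | zero =>
    simp only [Nat.cast_zero] at h0 h1
    simp [stScan, scanBody, h0, h1]
  | succ c =>
    push_cast at h0 h1 ⊢
    simp [stScan, scanBody, h0, h1, List.getLast?_append]

theorem lanes_getLastD_of_last {track : List String} {c : Nat} {f : Int} (s : Int)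
    (h : (stScan track c).2.getLast? = some ((c : Int), f)) :
    (lanesSpec track c).getLastD s = f := by
  have hm : (lanesSpec track c).getLast? = some f := by
    simp only [lanesSpec, List.getLast?_map, h, Option.map_some]
  rw [List.getLastD_eq_getLast?, hm]
  rfl

-- adjacency test over consecutive pairs: appending one element
theorem zipAny_concat {α : Type} (g : α × α → Bool) (L : List α) (x : α) :
    ((L ++ [x]).zip (L ++ [x]).tail).any g
      = ((L.zip L.tail).any g || (L.getLast?).elim false (fun y => g (y, x))) := by
  induction L with
  | nil => simp
  | cons a t ih =>
    cases t with
    | nil => simp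
    | cons b t' =>
      simp only [List.cons_append, List.tail_cons, List.zip_cons_cons, List.any_cons]
      simp only [List.cons_append, List.tail_cons] at ih
      rw [ih]
      simp [Bool.or_assoc, List.getLast?_cons_cons]

theorem mem_of_getLast?' {α : Type} {l : List α} {a : α} (h : l.getLast? = some a) : a ∈ l := by
  rw [List.getLast?_eq_getElem?] at h
  exact List.mem_of_getElem? h

theorem bothBlocked_flag (track : List String) (c : Nat)
    (h0 : pyBlocked track 0 (c : Int) = true) (h1 : pyBlocked track 1 (c : Int) = true) :
    (stScan track c).1 = true := by
  cases c with
  | zero =>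
    simp only [Nat.cast_zero] at h0 h1
    simp [stScan, scanBody, h0, h1]
  | succ c' =>
    push_cast at h0 h1
    simp [stScan, scanBody, h0, h1]

theorem lastAdj1 (track : List String) (c : Nat)
    (hflag : (stScan track c).1 = true → deadSpec track c = true) :
    (deadSpec track c ||
      ((stScan track c).2.getLast?).elim false
        (fun y => decide ((c : Int) + 1 = y.1 + 1) && decide (¬ y.2 = 1)))
    = (deadSpec track c || pyBlocked track 1 (c : Int)) := by
  rcases hL : (stScan track c).2.getLast? with _ | y
  · simp only [Option.elim, Bool.or_false]
    cases hbf : pyBlocked track 1 (c : Int)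
    · simp
    · cases hbo : pyBlocked track 0 (c : Int)
      · have := stScan_last0 track c hbo hbf
        rw [hL] at this; cases this
      · have hd := hflag (bothBlocked_flag track c hbo hbf)
        simp [hd]
  · have hym : y ∈ (stScan track c).2 := mem_of_getLast?' hL
    have hy := stScan_pos track c y hym
    have hy01 := stScan_mem01 track c y hym
    by_cases hyc : y.1 = (c : Int)
    · have hforced := hy.2 hyc
      rw [hyc] at hforced
      rcases hy01 with h2 | h2
      · have hb1 : pyBlocked track 1 (c : Int) = true := by
          have := hforced.1; rw [h2] at this; simpa using this
        simp [Option.elim, hyc, h2, hb1]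
      · have hb1 : pyBlocked track 1 (c : Int) = false := by
          have := hforced.2; rw [h2] at this; simpa using this
        simp [Option.elim, hyc, h2, hb1]
    · have hlt : y.1 < (c : Int) := lt_of_le_of_ne hy.1 hyc
      have helim : decide ((c : Int) + 1 = y.1 + 1) = false := by
        simp only [decide_eq_false_iff_not]; omega
      simp only [Option.elim, helim, Bool.false_and, Bool.or_false]
      cases hbf : pyBlocked track 1 (c : Int)
      · simp
      · cases hbo : pyBlocked track 0 (c : Int)
        · have := stScan_last0 track c hbo hbf
          rw [hL] at this
          injection this with h'
          exact absurd (congrArg Prod.fst h') (by simpa using hyc)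
        · have hd := hflag (bothBlocked_flag track c hbo hbf)
          simp [hd]

theorem lastAdj0 (track : List String) (c : Nat)
    (hflag : (stScan track c).1 = true → deadSpec track c = true) :
    (deadSpec track c ||
      ((stScan track c).2.getLast?).elim false
        (fun y => decide ((c : Int) + 1 = y.1 + 1) && decide (¬ y.2 = 0)))
    = (deadSpec track c || pyBlocked track 0 (c : Int)) := by
  rcases hL : (stScan track c).2.getLast? with _ | y
  · simp only [Option.elim, Bool.or_false]
    cases hbf : pyBlocked track 0 (c : Int)
    · simp
    · cases hbo : pyBlocked track 1 (c : Int)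
      · have := stScan_last1 track c hbf hbo
        rw [hL] at this; cases this
      · have hd := hflag (bothBlocked_flag track c hbf hbo)
        simp [hd]
  · have hym : y ∈ (stScan track c).2 := mem_of_getLast?' hL
    have hy := stScan_pos track c y hym
    have hy01 := stScan_mem01 track c y hym
    by_cases hyc : y.1 = (c : Int)
    · have hforced := hy.2 hyc
      rw [hyc] at hforced
      rcases hy01 with h2 | h2
      · have hb0 : pyBlocked track 0 (c : Int) = false := by
          have := hforced.2; rw [h2] at this; simpa using this
        simp [Option.elim, hyc, h2, hb0]
      · have hb0 : pyBlocked track 0 (c : Int) = true := by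
          have := hforced.1; rw [h2] at this; simpa using this
        simp [Option.elim, hyc, h2, hb0]
    · have hlt : y.1 < (c : Int) := lt_of_le_of_ne hy.1 hyc
      have helim : decide ((c : Int) + 1 = y.1 + 1) = false := by
        simp only [decide_eq_false_iff_not]; omega
      simp only [Option.elim, helim, Bool.false_and, Bool.or_false]
      cases hbf : pyBlocked track 0 (c : Int)
      · simp
      · cases hbo : pyBlocked track 1 (c : Int)
        · have := stScan_last1 track c hbf hbo
          rw [hL] at this
          injection this with h'
          exact absurd (congrArg Prod.fst h') (by simpa using hyc)
        · have hd := hflag (bothBlocked_flag track c hbf hbo)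
          simp [hd]

theorem dead_eq (track : List String) (c : Nat) :
    ((stScan track c).1
      || (((stScan track c).2.zip (stScan track c).2.tail).any
            fun p => decide (p.2.1 = p.1.1 + 1) && decide (¬ p.1.2 = p.2.2)))
      = deadSpec track c := by
  induction c with
  | zero =>
    simp only [stScan, scanBody, deadSpec, Nat.cast_zero]
    split_ifs with h1 h2 h3 <;> simp_all
  | succ c ih =>
    have hflag : (stScan track c).1 = true → deadSpec track c = true := by
      intro h; rw [← ih, h, Bool.true_or]
    cases hb0 : pyBlocked track 0 ((c : Int) + 1) <;>
      cases hb1 : pyBlocked track 1 ((c : Int) + 1)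
    · simp only [stScan, scanBody, deadSpec, hb0, hb1, Bool.false_and, Bool.false_eq_true,
        if_false, Bool.or_false]
      exact ih
    · -- forced lane 0 (bottom blocked)
      simp only [stScan, scanBody, deadSpec, hb0, hb1, Bool.false_and, Bool.false_eq_true,
        Bool.true_eq_false, if_false, if_true]
      rw [zipAny_concat, ← Bool.or_assoc, ih]
      have h := lastAdj0 track c hflag
      simpa using h
    · -- forced lane 1 (top blocked)
      simp only [stScan, scanBody, deadSpec, hb0, hb1, Bool.and_false, Bool.false_eq_true,
        Bool.true_eq_false, if_false, if_true]
      rw [zipAny_concat, ← Bool.or_assoc, ih]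
      have h := lastAdj1 track c hflag
      simpa using h
    · simp [stScan, scanBody, deadSpec, hb0, hb1]

theorem stScan_len (track : List String) (c : Nat) :
    ((stScan track c).2).length ≤ c + 1 := by
  induction c with
  | zero =>
    simp only [stScan, scanBody]
    split_ifs <;> simp
  | succ c ih =>
    simp only [stScan, scanBody]
    split_ifs <;>
      (try simp only [List.length_append, List.length_cons, List.length_nil]) <;> omega

theorem lanes_len (track : List String) (c : Nat) :
    (lanesSpec track c).length ≤ c + 1 := by
  simpa [lanesSpec] using stScan_len track c

theorem lanes_last1 (track : List String) (c : Nat) (s : Int)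
    (h0 : pyBlocked track 0 (c : Int) = true) (h1 : pyBlocked track 1 (c : Int) = false) :
    (lanesSpec track c).getLastD s = 1 :=
  lanes_getLastD_of_last s (stScan_last1 track c h0 h1)

theorem lanes_last0 (track : List String) (c : Nat) (s : Int)
    (h0 : pyBlocked track 0 (c : Int) = false) (h1 : pyBlocked track 1 (c : Int) = true) :
    (lanesSpec track c).getLastD s = 0 :=
  lanes_getLastD_of_last s (stScan_last0 track c h0 h1)

theorem zipFold_chg (t : List Int) (x A : Int) :
    (List.zip (x :: t) t).foldl (fun a p => a + (if p.1 ≠ p.2 then 1 else 0)) A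
      = A + chg x t := by
  induction t generalizing x A with
  | nil => simp [chg]
  | cons y t' ih =>
    simp only [List.zip_cons_cons, List.foldl_cons, chg, ih y]
    split_ifs <;> omega

theorem scan_fold (track : List String) (c : Nat) :
    (PySem.List.pyRange 0 ((c : Int) + 1)).foldl (scanBody track) (false, [])
      = stScan track c := by
  induction c with
  | zero =>
    rw [show ((0 : Nat) : Int) + 1 = 0 + 1 by norm_num, PySem.List.pyRange_one_singleton]
    rfl
  | succ c ih =>
    have hl : PySem.List.pyRange 0 (((c + 1 : Nat) : Int) + 1)
        = PySem.List.pyRange 0 ((c : Int) + 1) ++ [(c : Int) + 1] := by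
      push_cast
      exact PySem.List.pyRange_one_succ_right (by omega)
    rw [hl, List.foldl_append, ih]
    rfl

theorem minINF : min INFv (INFv + 1) = INFv := by norm_num [INFv]

-- the key invariant: A's per-column DP pair equals the forced-lane closed form
theorem vpair_eq_D (track : List String) (s : Nat) (hs : s < 2) (c : Nat)
    (hc : (c : Int) ≤ 2147483647) :
    vpair track s c = (Dfun track (s : Int) c 0, Dfun track (s : Int) c 1) := by
  induction c with
  | zero =>
    have h00 : pyBlocked track 0 0 = decide (chAt track 0 0 ≠ '.') := pyBlocked_zero track 0
    have h10 : pyBlocked track 1 0 = decide (chAt track 1 0 ≠ '.') := pyBlocked_zero track 1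
    interval_cases s <;>
      by_cases hp : chAt track 0 0 = '.' <;> by_cases hq : chAt track 1 0 = '.' <;>
        (simp [vpair, initTab, Dfun, deadSpec, lanesSpec, stScan, scanBody, h00, h10,
          hp, hq, chg, minINF, List.getLastD]
         <;> norm_num [INFv])
  | succ c ih =>
    have hc' : (c : Int) ≤ 2147483647 := by push_cast at hc ⊢; omega
    have IH := ih hc'
    have hcast : ((c + 1 : Nat) : Int) = (c : Int) + 1 := by push_cast; ring
    have hB0 : 0 ≤ chg (s : Int) (lanesSpec track c) := chg_nonneg _ _
    have hB1 : chg (s : Int) (lanesSpec track c) ≤ (c : Int) + 1 := by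
      have h1 := chg_le (s : Int) (lanesSpec track c)
      have h2 := lanes_len track c
      push_cast at h1 ⊢
      omega
    have hL : (lanesSpec track c).getLastD (s : Int) = 0 ∨
        (lanesSpec track c).getLastD (s : Int) = 1 := by
      rcases getLastD_mem (lanesSpec track c) (s : Int) with h | h
      · rw [h]; interval_cases s <;> simp
      · exact lanes_mem01 track c _ h
    have hP0 : pyBlocked track 0 ((c : Int) + 1)
        = decide (chAt track 0 ((c : Int) + 1) = '#') := pyBlocked_succ track 0 c
    have hP1 : pyBlocked track 1 ((c : Int) + 1)
        = decide (chAt track 1 ((c : Int) + 1) = '#') := pyBlocked_succ track 1 c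
    have hflag : (stScan track c).1 = true → deadSpec track c = true := by
      intro h
      rw [← dead_eq track c, h, Bool.true_or]
    have hnbb : deadSpec track c = false →
        ¬(pyBlocked track 0 (c : Int) = true ∧ pyBlocked track 1 (c : Int) = true) := by
      intro hd ⟨u, v⟩
      rw [hflag (bothBlocked_flag track c u v)] at hd
      cases hd
    rw [show vpair track s (c + 1)
        = stepA (chAt track 0 ((c : Int) + 1)) (chAt track 1 ((c : Int) + 1)) (vpair track s c)
      from rfl, IH]
    by_cases ha : chAt track 0 ((c : Int) + 1) = '#' <;>
      by_cases hb : chAt track 1 ((c : Int) + 1) = '#'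
    · -- column c+1 fully blocked
      have hdead : deadSpec track (c + 1) = true := by
        simp [deadSpec, hP0, hP1, ha, hb]
      simp [stepA, Dfun, ha, hb, hdead, hcast, hP0, hP1]
    · -- forced lane 1 (top blocked)
      have hlanes : lanesSpec track (c + 1) = lanesSpec track c ++ [1] := by
        simp [lanesSpec, stScan, scanBody, hP0, hP1, ha, hb]
      have hdead : deadSpec track (c + 1)
          = (deadSpec track c || pyBlocked track 1 (c : Int)) := by
        simp [deadSpec, hP0, hP1, ha, hb]
      simp only [stepA, Dfun, hlanes, hdead, hcast, hP0, hP1, ha, hb, chg_concat,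
        List.getLastD_concat, ne_eq, not_true_eq_false, not_false_eq_true, if_true, if_false,
        decide_true, decide_false, Prod.mk.injEq]
      cases hdd : deadSpec track c <;> cases hbs : pyBlocked track (s : Int) 0 <;>
        cases hb1 : pyBlocked track 1 (c : Int) <;>
        simp only [Bool.false_or, Bool.true_or, Bool.or_false, Bool.or_true, if_true, if_false,
          Bool.false_eq_true, if_pos rfl] <;>
        rcases hL with hL' | hL' <;> (try rw [hL']) <;>
        constructor <;> simp [INFv] <;> omega
    · -- forced lane 0 (bottom blocked)
      have hlanes : lanesSpec track (c + 1) = lanesSpec track c ++ [0] := by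
        simp [lanesSpec, stScan, scanBody, hP0, hP1, ha, hb]
      have hdead : deadSpec track (c + 1)
          = (deadSpec track c || pyBlocked track 0 (c : Int)) := by
        simp [deadSpec, hP0, hP1, ha, hb]
      simp only [stepA, Dfun, hlanes, hdead, hcast, hP0, hP1, ha, hb, chg_concat,
        List.getLastD_concat, ne_eq, not_true_eq_false, not_false_eq_true, if_true, if_false,
        decide_true, decide_false, Prod.mk.injEq]
      cases hdd : deadSpec track c <;> cases hbs : pyBlocked track (s : Int) 0 <;>
        cases hb0 : pyBlocked track 0 (c : Int) <;>
        simp only [Bool.false_or, Bool.true_or, Bool.or_false, Bool.or_true, if_true, if_false,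
          Bool.false_eq_true, if_pos rfl] <;>
        rcases hL with hL' | hL' <;> (try rw [hL']) <;>
        constructor <;> simp [INFv] <;> omega
    · -- column c+1 open in both lanes
      have hlanes : lanesSpec track (c + 1) = lanesSpec track c := by
        simp [lanesSpec, stScan, scanBody, hP0, hP1, ha, hb]
      have hdead : deadSpec track (c + 1) = deadSpec track c := by
        simp [deadSpec, hP0, hP1, ha, hb]
      simp only [stepA, Dfun, hlanes, hdead, hcast, hP0, hP1, ha, hb, ne_eq,
        not_true_eq_false, not_false_eq_true, if_true, if_false,
        decide_true, decide_false, Prod.mk.injEq]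
      cases hdd : deadSpec track c <;> cases hbs : pyBlocked track (s : Int) 0
      · -- alive: split on which lane (if any) was blocked at column c
        cases hb0 : pyBlocked track 0 (c : Int) <;> cases hb1 : pyBlocked track 1 (c : Int)
        · rcases hL with hL' | hL' <;> (try rw [hL']) <;>
            constructor <;> simp [INFv] <;> omega
        · have hLv := lanes_last0 track c (s : Int) hb0 hb1
          (try rw [hLv])
          constructor <;> simp [INFv] <;> omega
        · have hLv := lanes_last1 track c (s : Int) hb0 hb1
          (try rw [hLv])
          constructor <;> simp [INFv] <;> omega
        · exact absurd ⟨hb0, hb1⟩ (hnbb hdd)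
      all_goals constructor <;> simp [INFv] <;> omega

theorem Dfun_le (track : List String) (s : Int) (c : Nat) (r : Int)
    (hc : (c : Int) ≤ 2147483647) :
    Dfun track s c r ≤ INFv := by
  unfold Dfun
  split_ifs with h1 h2 <;>
    first
      | exact le_refl _
      | (have h3 := chg_le s (lanesSpec track c)
         have h4 := lanes_len track c
         have h5 := chg_nonneg s (lanesSpec track c)
         simp only [INFv]
         push_cast at h3 h4 ⊢
         omega)

theorem distApart_eq (track : List String) (n : Nat) (hn : 1 ≤ n) (s r : Int) :
    distApart ((n : Nat) : Int) track (deadSpec track (n - 1)) (lanesSpec track (n - 1)) s r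
      = Dfun track s (n - 1) r := by
  have hcast : ((n : Nat) : Int) - 1 = ((n - 1 : Nat) : Int) := by omega
  simp only [distApart, Dfun, hcast]
  by_cases hcond : (deadSpec track (n - 1) || pyBlocked track s 0
      || pyBlocked track r ((n - 1 : Nat) : Int)) = true
  · rw [if_pos hcond, if_pos hcond]
  · rw [if_neg hcond, if_neg hcond]
    rw [show ([s] ++ lanesSpec track (n - 1) ++ [r])
        = s :: (lanesSpec track (n - 1) ++ [r]) from rfl]
    rw [show (s :: (lanesSpec track (n - 1) ++ [r])).tail
        = lanesSpec track (n - 1) ++ [r] from rfl]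
    rw [zipFold_chg, chg_concat]
    ring

theorem solve_eq_alt (N K : Int) (track : List String)
    (hN1 : 1 ≤ N) (hNb : N ≤ 2147483648) (hlen : 2 ≤ track.length)
    (hL0 : N ≤ PySem.Str.len ((PySem.List.pyGet? track 0).getD ""))
    (hL1 : N ≤ PySem.Str.len ((PySem.List.pyGet? track 1).getD "")) :
    solve N K track = solve_alt N K track := by
  have hNn : N = ((N.toNat : Nat) : Int) := by omega
  set n := N.toNat with hndef
  have hn : 1 ≤ n := by omega
  have hbound : ((n - 1 : Nat) : Int) ≤ 2147483647 := by omega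
  -- readouts of A's final memo
  have R00 : get3 (memoBuild (finTab track n) n) 0 (-1) 0 = (vpair track 0 (n - 1)).1 := by
    have h := get3_memoBuild_neg (finTab track n) n 0 0 (by omega) hn (by omega)
    push_cast at h
    rw [h]
    simp [finTab, passTab]
  have R01 : get3 (memoBuild (finTab track n) n) 0 (-1) 1 = (vpair track 1 (n - 1)).1 := by
    have h := get3_memoBuild_neg (finTab track n) n 0 1 (by omega) hn (by omega)
    push_cast at h
    rw [h]
    simp [finTab, passTab]
  have R10 : get3 (memoBuild (finTab track n) n) 1 (-1) 0 = (vpair track 0 (n - 1)).2 := by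
    have h := get3_memoBuild_neg (finTab track n) n 1 0 (by omega) hn (by omega)
    push_cast at h
    rw [h]
    simp [finTab, passTab]
  have R11 : get3 (memoBuild (finTab track n) n) 1 (-1) 1 = (vpair track 1 (n - 1)).2 := by
    have h := get3_memoBuild_neg (finTab track n) n 1 1 (by omega) hn (by omega)
    push_cast at h
    rw [h]
    simp [finTab, passTab]
  have V0 := vpair_eq_D track 0 (by omega) (n - 1) hbound
  have V1 := vpair_eq_D track 1 (by omega) (n - 1) hbound
  simp only [Nat.cast_zero, Nat.cast_one] at V0 V1
  have hsc : (PySem.List.pyRange 0 ((n : Nat) : Int)).foldl (scanBody track) (false, [])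
      = stScan track (n - 1) := by
    have h := scan_fold track (n - 1)
    rw [show (((n - 1 : Nat) : Int) + 1) = ((n : Nat) : Int) from by omega] at h
    exact h
  have le00 : Dfun track 0 (n - 1) 0 ≤ INFv := Dfun_le track 0 (n - 1) 0 hbound
  rw [hNn]
  simp only [solve, solve_alt]
  rw [memo0_eq track n, m4_eq track n hn, startFold track n hn]
  rw [R00, R01, R10, R11]
  rw [hsc, dead_eq track (n - 1)]
  rw [show ((stScan track (n - 1)).2).map Prod.snd = lanesSpec track (n - 1) from rfl]
  rw [distApart_eq track n hn 0 0, distApart_eq track n hn 0 1,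
    distApart_eq track n hn 1 0, distApart_eq track n hn 1 1]
  rw [V0, V1]
  simp only [min_eq_right le00, chAt]

-- ===== VERDICT (by name: the statement is the Claim_ definition above) =====
theorem solve_spec : Claim_equal_solve := by
  intro N K track hdom hpre
  obtain ⟨hN1, hlen, hL0, hL1⟩ := hpre
  have hNb : N ≤ 2147483648 := by
    unfold Dom_solve at hdom
    simp only [Bool.and_eq_true] at hdom
    have := hdom.1.1
    unfold pvDomInt at this
    have h := of_decide_eq_true this
    exact h.2
  unfold Spec_solve
  exact solve_eq_alt N K track hN1 hNb hlen hL0 hL1
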